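-- pv_equiv track=rewrite | github.com/minghinshi/Advent-of-Code-2022 | Code/Day14.py | get_wall
-- ===== SOURCE A (Python) =====
-- def get_wall(x1, y1, x2, y2):
--     if x1 == x2:
--         if y1 > y2:
--             y1, y2 = y2, y1
--         return [(x1, y) for y in range(y1+1, y2)]
--     elif y1 == y2:
--         if x1 > x2:
--             x1, x2 = x2, x1
--         return [(x, y1) for x in range(x1+1, x2)]
-- ===== SOURCE B (Python) =====
-- def get_wall(x1, y1, x2, y2):
--     if x1 != x2 and y1 != y2:
--         return None
--     (ax, ay), (bx, by) = sorted(((x1, y1), (x2, y2)))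
--     dx = (bx > ax) - (bx < ax)
--     dy = (by > ay) - (by < ay)
--     pts = []
--     cx, cy = ax + dx, ay + dy
--     while (cx, cy) != (bx, by):
--         pts.append((cx, cy))
--         cx += dx
--         cy += dy
--     return pts
-- ===== Notes on version B (the rewrite author's own statement) =====
-- stated objective: alternative
-- what changed: Replaced the two orientation-specific range comprehensions (with an explicit endpoint swap per branch) by a single normalized segment walk: endpoints are lex-sorted, a unit step (dx,dy) is computed by sign, and a cursor starting one step past the low endpoint is advanced until it reaches the high endpoint.
import Mathlib
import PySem

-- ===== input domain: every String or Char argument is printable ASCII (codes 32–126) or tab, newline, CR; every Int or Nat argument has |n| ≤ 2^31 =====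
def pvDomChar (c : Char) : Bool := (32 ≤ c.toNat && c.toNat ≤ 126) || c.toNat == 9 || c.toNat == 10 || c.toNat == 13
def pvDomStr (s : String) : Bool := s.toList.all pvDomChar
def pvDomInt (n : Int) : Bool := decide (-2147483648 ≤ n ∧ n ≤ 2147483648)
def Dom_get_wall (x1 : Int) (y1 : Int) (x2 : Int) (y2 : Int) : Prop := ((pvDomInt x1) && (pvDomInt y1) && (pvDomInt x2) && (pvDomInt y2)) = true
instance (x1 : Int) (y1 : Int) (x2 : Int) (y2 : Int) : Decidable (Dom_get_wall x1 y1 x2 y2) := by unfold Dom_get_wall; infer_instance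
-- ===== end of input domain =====

-- B replaces the two orientation-specific range comprehensions by one normalized
-- cursor walk with a unit step (alternative decomposition; same cost).

-- ===== PORT A =====
-- the 'if y1 > y2: swap' is inlined into the two branches of each comprehension
def get_wall (x1 : Int) (y1 : Int) (x2 : Int) (y2 : Int) : Option (List (Int × Int)) :=
  if x1 = x2 then
    if y1 > y2 then some ((PySem.List.pyRange (y2 + 1) y1 1).map (fun y => (x1, y)))
    else some ((PySem.List.pyRange (y1 + 1) y2 1).map (fun y => (x1, y)))
  else if y1 = y2 then
    if x1 > x2 then some ((PySem.List.pyRange (x2 + 1) x1 1).map (fun x => (x, y1)))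
    else some ((PySem.List.pyRange (x1 + 1) x2 1).map (fun x => (x, y1)))
  else none

-- ===== PORT B =====
-- the while loop of Source B, as fuel recursion; fuel = Manhattan gap bounds the iteration count
def walkAux (bx byy dx dy : Int) : Nat → Int → Int → List (Int × Int)
  | 0, _, _ => []
  | f + 1, cx, cy =>
      if cx = bx ∧ cy = byy then []
      else (cx, cy) :: walkAux bx byy dx dy f (cx + dx) (cy + dy)

def get_wall_alt (x1 : Int) (y1 : Int) (x2 : Int) (y2 : Int) : Option (List (Int × Int)) :=
  if x1 ≠ x2 ∧ y1 ≠ y2 then none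
  else
    -- sorted(((x1,y1),(x2,y2))): lexicographic order on pairs
    let ab := if x1 < x2 ∨ (x1 = x2 ∧ y1 ≤ y2) then ((x1, y1), (x2, y2)) else ((x2, y2), (x1, y1))
    let ax := ab.1.1
    let ay := ab.1.2
    let bx := ab.2.1
    let byy := ab.2.2
    let dx : Int := (if ax < bx then 1 else 0) - (if bx < ax then 1 else 0)
    let dy : Int := (if ay < byy then 1 else 0) - (if byy < ay then 1 else 0)
    some (walkAux bx byy dx dy ((bx - ax) + (byy - ay)).toNat (ax + dx) (ay + dy))

-- ===== PRECONDITION & SPEC =====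
def Spec_get_wall (x1 : Int) (y1 : Int) (x2 : Int) (y2 : Int) (out : Option (List (Int × Int))) : Prop := out = get_wall_alt x1 y1 x2 y2
instance (x1 : Int) (y1 : Int) (x2 : Int) (y2 : Int) (out : Option (List (Int × Int))) : Decidable (Spec_get_wall x1 y1 x2 y2 out) := by unfold Spec_get_wall; infer_instance

-- ===== CLAIM (what is proved, stated in full; the proofs are below) =====
def Claim_equal_get_wall : Prop := ∀ (x1 : Int) (y1 : Int) (x2 : Int) (y2 : Int), Dom_get_wall x1 y1 x2 y2 → Spec_get_wall x1 y1 x2 y2 (get_wall x1 y1 x2 y2)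

-- ===== LEMMAS AND PROOFS =====
lemma walk_vert (n : Nat) : ∀ (f : Nat), n ≤ f → ∀ (bx cy : Int),
    walkAux bx (cy + n) 0 1 f bx cy
      = (PySem.List.pyRange cy (cy + n) 1).map (fun y => (bx, y)) := by
  induction n with
  | zero =>
    intro f _ bx cy
    cases f with
    | zero => simp [walkAux, PySem.List.pyRange_one_eq_nil (le_refl cy)]
    | succ m => simp [walkAux, PySem.List.pyRange_one_eq_nil (le_refl cy)]
  | succ n ih =>
    intro f hf bx cy
    cases f with
    | zero => omega
    | succ m =>
      have hne : ¬ (bx = bx ∧ cy = cy + (n + 1 : Nat)) := by push_cast; omega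
      have hlt : cy < cy + (n + 1 : Nat) := by push_cast; omega
      have hstep : cy + ((n : Int) + 1) = (cy + 1) + n := by ring
      simp only [walkAux, hne, PySem.List.pyRange_one_cons hlt, List.map_cons]
      push_cast
      rw [hstep]
      have := ih m (by omega) bx (cy + 1)
      push_cast at this
      simp [this, add_zero]
      omega

lemma walk_horiz (n : Nat) : ∀ (f : Nat), n ≤ f → ∀ (byy cx : Int),
    walkAux (cx + n) byy 1 0 f cx byy
      = (PySem.List.pyRange cx (cx + n) 1).map (fun x => (x, byy)) := by
  induction n with
  | zero =>
    intro f _ byy cx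
    cases f with
    | zero => simp [walkAux, PySem.List.pyRange_one_eq_nil (le_refl cx)]
    | succ m => simp [walkAux, PySem.List.pyRange_one_eq_nil (le_refl cx)]
  | succ n ih =>
    intro f hf byy cx
    cases f with
    | zero => omega
    | succ m =>
      have hne : ¬ (cx = cx + (n + 1 : Nat) ∧ byy = byy) := by push_cast; omega
      have hlt : cx < cx + (n + 1 : Nat) := by push_cast; omega
      have hstep : cx + ((n : Int) + 1) = (cx + 1) + n := by ring
      simp only [walkAux, hne, PySem.List.pyRange_one_cons hlt, List.map_cons]
      push_cast
      rw [hstep]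
      have := ih m (by omega) byy (cx + 1)
      push_cast at this
      simp [this, add_zero]
      omega

-- ===== VERDICT (by name: the statement is the Claim_ definition above) =====
theorem get_wall_spec : Claim_equal_get_wall := by
  intro x1 y1 x2 y2 _
  unfold Spec_get_wall
  by_cases hx : x1 = x2
  · subst hx
    by_cases hy : y1 = y2
    · -- single point: both give some []
      subst hy
      have e1 : get_wall x1 y1 x1 y1 = some [] := by
        simp [get_wall, PySem.List.pyRange_one_eq_nil (by omega : y1 ≤ y1 + 1)]
      have e2 : get_wall_alt x1 y1 x1 y1 = some [] := by
        simp only [get_wall_alt, ne_eq, not_true_eq_false, false_and, if_false, lt_irrefl,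
          false_or, true_and]
        rw [if_pos (le_refl y1)]
        norm_num [walkAux]
      rw [e1, e2]
    · by_cases hlt : y1 < y2
      · -- vertical, already sorted
        have e1 : get_wall x1 y1 x1 y2 = some ((PySem.List.pyRange (y1 + 1) y2 1).map (fun y => (x1, y))) := by
          simp [get_wall, show ¬ y1 > y2 by omega]
        have e2 : get_wall_alt x1 y1 x1 y2 = some (walkAux x1 y2 0 1 (y2 - y1).toNat x1 (y1 + 1)) := by
          simp only [get_wall_alt, ne_eq, not_true_eq_false, false_and, if_false, lt_irrefl,
            false_or, true_and]
          rw [if_pos (le_of_lt hlt)]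
          norm_num [hlt, show ¬ y2 < y1 by omega]
        rw [e1, e2]
        have := walk_vert (y2 - y1 - 1).toNat (y2 - y1).toNat (by omega) x1 (y1 + 1)
        rw [show (y1 + 1) + (((y2 - y1 - 1).toNat : Int)) = y2 by omega] at this
        rw [this]
      · -- vertical, swapped: y2 < y1
        have hgt : y2 < y1 := by omega
        have e1 : get_wall x1 y1 x1 y2 = some ((PySem.List.pyRange (y2 + 1) y1 1).map (fun y => (x1, y))) := by
          simp [get_wall, show y1 > y2 from hgt]
        have e2 : get_wall_alt x1 y1 x1 y2 = some (walkAux x1 y1 0 1 (y1 - y2).toNat x1 (y2 + 1)) := by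
          simp only [get_wall_alt, ne_eq, not_true_eq_false, false_and, if_false, lt_irrefl,
            false_or, true_and]
          rw [if_neg (show ¬ y1 ≤ y2 by omega)]
          norm_num [hgt, show ¬ y1 < y2 by omega]
        rw [e1, e2]
        have := walk_vert (y1 - y2 - 1).toNat (y1 - y2).toNat (by omega) x1 (y2 + 1)
        rw [show (y2 + 1) + (((y1 - y2 - 1).toNat : Int)) = y1 by omega] at this
        rw [this]
  · by_cases hy : y1 = y2
    · subst hy
      by_cases hlt : x1 < x2
      · -- horizontal, already sorted
        have e1 : get_wall x1 y1 x2 y1 = some ((PySem.List.pyRange (x1 + 1) x2 1).map (fun x => (x, y1))) := by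
          simp [get_wall, hx, show ¬ x1 > x2 by omega]
        have e2 : get_wall_alt x1 y1 x2 y1 = some (walkAux x2 y1 1 0 (x2 - x1).toNat (x1 + 1) y1) := by
          simp only [get_wall_alt, ne_eq, not_true_eq_false, and_false, if_false]
          rw [if_pos (Or.inl hlt)]
          norm_num [hlt, show ¬ x2 < x1 by omega]
        rw [e1, e2]
        have := walk_horiz (x2 - x1 - 1).toNat (x2 - x1).toNat (by omega) y1 (x1 + 1)
        rw [show (x1 + 1) + (((x2 - x1 - 1).toNat : Int)) = x2 by omega] at this
        rw [this]
      · -- horizontal, swapped: x2 < x1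
        have hgt : x2 < x1 := by omega
        have e1 : get_wall x1 y1 x2 y1 = some ((PySem.List.pyRange (x2 + 1) x1 1).map (fun x => (x, y1))) := by
          simp [get_wall, hx, show x1 > x2 from hgt]
        have e2 : get_wall_alt x1 y1 x2 y1 = some (walkAux x1 y1 1 0 (x1 - x2).toNat (x2 + 1) y1) := by
          simp only [get_wall_alt, ne_eq, not_true_eq_false, and_false, if_false]
          rw [if_neg (show ¬ (x1 < x2 ∨ (x1 = x2 ∧ y1 ≤ y1)) by omega)]
          norm_num [hgt, show ¬ x1 < x2 by omega]
        rw [e1, e2]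
        have := walk_horiz (x1 - x2 - 1).toNat (x1 - x2).toNat (by omega) y1 (x2 + 1)
        rw [show (x2 + 1) + (((x1 - x2 - 1).toNat : Int)) = x1 by omega] at this
        rw [this]
    · -- diagonal: both none
      simp [get_wall, get_wall_alt, hx, hy]
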